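-- pv_equiv track=rewrite | github.com/MaksWisniewski/syntax-aware-language-model-for-code-generation | segmentation/.ipynb_checkpoints/code_segmentation-checkpoint.py | extract_single_line_span
-- ===== SOURCE A (Python) =====
-- from typing import List, Tuple, Optional
--
-- def extract_single_line_span(tokens: List[str], keyword_tag: str) -> List[Tuple[int, int]]:
--     spans = []
--     i = 0
--     while i < len(tokens):
--         if tokens[i] == keyword_tag:
--             start = i
--             end = i + 1
--             while end < len(tokens) and tokens[end] not in ("[NEW_LINE]", "[INDENT]", "[DEDENT]"):
--                 end += 1
--             spans.append((start, end - 1 if end < len(tokens) and tokens[end] in ("[NEW_LINE]", "[INDENT]", "[DEDENT]") else end))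
--             i = end
--         else:
--             i += 1
--     return spans
-- ===== SOURCE B (Python) =====
-- SEPS = ("[NEW_LINE]", "[INDENT]", "[DEDENT]")
--
-- def extract_single_line_span(tokens, keyword_tag):
--     spans = []
--     n = len(tokens)
--     i = 0
--     while i < n:
--         # segment one line: tokens[i:j] up to the next separator (or EOF)
--         j = i
--         while j < n and tokens[j] not in SEPS:
--             j += 1
--         # first keyword inside the line opens the span for this line
--         for k in range(i, j):
--             if tokens[k] == keyword_tag:
--                 spans.append((k, j - 1 if j < n else j))
--                 break
--         i = j + 1
--     return spans
-- ===== Notes on version B (the rewrite author's own statement) =====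
-- stated objective: alternative
-- what changed: B first segments the token stream into separator-delimited lines with an explicit outer loop and then searches each line for the first keyword, instead of A's token-by-token scan that, on hitting a keyword, runs a nested scan to the line end and jumps the cursor there.
-- outside the precondition, e.g. on extract_single_line_span(['[NEW_LINE]'], '[NEW_LINE]'): A returns [(0, 1)], B returns []
import Mathlib
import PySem

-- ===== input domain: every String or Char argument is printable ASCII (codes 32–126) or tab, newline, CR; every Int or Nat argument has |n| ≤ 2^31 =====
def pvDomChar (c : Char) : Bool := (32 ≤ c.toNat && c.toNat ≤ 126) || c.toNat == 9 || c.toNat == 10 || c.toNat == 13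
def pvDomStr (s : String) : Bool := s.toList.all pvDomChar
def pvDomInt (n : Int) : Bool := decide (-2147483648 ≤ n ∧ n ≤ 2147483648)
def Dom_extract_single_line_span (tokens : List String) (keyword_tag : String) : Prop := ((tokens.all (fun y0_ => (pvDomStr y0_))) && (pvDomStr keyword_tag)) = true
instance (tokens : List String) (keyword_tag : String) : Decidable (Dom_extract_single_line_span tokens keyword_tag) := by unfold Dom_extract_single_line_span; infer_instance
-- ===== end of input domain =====

-- B segments the stream into separator-delimited lines, then searches each line for its first
-- keyword; A scans token-by-token with a nested scan-to-line-end on each keyword hit (alternative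
-- decomposition, same cost).

def pvIsSep (t : String) : Bool := t == "[NEW_LINE]" || t == "[INDENT]" || t == "[DEDENT]"

-- ===== PORT A =====
-- inner while loop of A: advance `end` until a separator or EOF; returns (end, tokens[end:])
def pvScanA : List String → Int → Int × List String
  | [], e => (e, [])
  | t :: r, e => if pvIsSep t then (e, t :: r) else pvScanA r (e + 1)

theorem pvScanA_len_le : ∀ (r : List String) (e : Int), (pvScanA r e).2.length ≤ r.length := by
  intro r
  induction r with
  | nil => intro e; simp [pvScanA]
  | cons t r ih =>
    intro e
    simp only [pvScanA]
    split
    · simp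
    · exact Nat.le_trans (ih (e + 1)) (Nat.le_succ _)

-- A's outer while loop over the suffix at absolute index i
def pvGoA (kw : String) : List String → Int → List (Int × Int)
  | [], _ => []
  | t :: r, i =>
    if t == kw then
      let p := pvScanA r (i + 1)
      -- "end - 1 if end < len(tokens) and tokens[end] in seps else end"
      let e2 : Int := match p.2 with
        | s :: _ => if pvIsSep s then p.1 - 1 else p.1
        | [] => p.1
      (i, e2) :: pvGoA kw p.2 p.1
    else
      pvGoA kw r (i + 1)
  termination_by ts _ => ts.length
  decreasing_by
  · exact Nat.lt_succ_of_le (pvScanA_len_le r (i + 1))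
  · simp

def extract_single_line_span (tokens : List String) (keyword_tag : String) : List (Int × Int) :=
  pvGoA keyword_tag tokens 0

-- ===== PORT B =====
-- B's inner line-segmentation loop: (line, rest) with rest starting at the separator (or [])
def pvLineSplit : List String → List String × List String
  | [] => ([], [])
  | t :: r => if pvIsSep t then ([], t :: r) else
      let p := pvLineSplit r
      (t :: p.1, p.2)

theorem pvLineSplit_len_le : ∀ (ts : List String), (pvLineSplit ts).2.length ≤ ts.length := by
  intro ts
  induction ts with
  | nil => simp [pvLineSplit]
  | cons t r ih =>
    simp only [pvLineSplit]
    split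
    · simp
    · exact Nat.le_trans ih (Nat.le_succ _)

theorem pvLineSplit_tail_lt (t : String) (r : List String) :
    (pvLineSplit (t :: r)).2.tail.length < (t :: r).length := by
  have h := pvLineSplit_len_le (t :: r)
  cases hres : (pvLineSplit (t :: r)).2 with
  | nil => simp
  | cons s rest =>
    rw [hres] at h
    simp only [List.tail_cons]
    simp only [List.length_cons] at h ⊢
    omega

-- B's inner for loop: first index of the keyword within the line
def pvFindK (kw : String) : List String → Int → Option Int
  | [], _ => none
  | t :: r, k => if t == kw then some k else pvFindK kw r (k + 1)

-- B's outer while loop over lines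
def pvGoB (kw : String) : List String → Int → List (Int × Int)
  | [], _ => []
  | t :: r, i =>
    let p := pvLineSplit (t :: r)
    let j : Int := i + p.1.length
    let hd : List (Int × Int) := match pvFindK kw p.1 i with
      | some k => [(k, if p.2 ≠ [] then j - 1 else j)]
      | none => []
    hd ++ pvGoB kw p.2.tail (j + 1)
  termination_by ts _ => ts.length
  decreasing_by
  · exact pvLineSplit_tail_lt t r

def extract_single_line_span_alt (tokens : List String) (keyword_tag : String) : List (Int × Int) :=
  pvGoB keyword_tag tokens 0

-- ===== PRECONDITION & SPEC =====
-- Pre_ excludes the degenerate case where the searched keyword is itself one of the three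
-- line-separator tags AND actually occurs in the tokens: there A's span (from the separator
-- through the NEXT line) and B's line-local answer are both accidental readings of an
-- unspecified corner.
def Pre_extract_single_line_span (tokens : List String) (keyword_tag : String) : Prop :=
  pvIsSep keyword_tag = false ∨ keyword_tag ∉ tokens
instance (tokens : List String) (keyword_tag : String) : Decidable (Pre_extract_single_line_span tokens keyword_tag) := by unfold Pre_extract_single_line_span; infer_instance

def pvWitness_extract_single_line_span : List String × String :=
  (["def", "kw", "x", "[NEW_LINE]", "kw"], "kw")

def Spec_extract_single_line_span (tokens : List String) (keyword_tag : String) (out : List (Int × Int)) : Prop := out = extract_single_line_span_alt tokens keyword_tag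
instance (tokens : List String) (keyword_tag : String) (out : List (Int × Int)) : Decidable (Spec_extract_single_line_span tokens keyword_tag out) := by unfold Spec_extract_single_line_span; infer_instance

-- ===== CLAIM (what is proved, stated in full; the proofs are below) =====
def Claim_equal_extract_single_line_span : Prop := ∀ (tokens : List String) (keyword_tag : String), Dom_extract_single_line_span tokens keyword_tag → Pre_extract_single_line_span tokens keyword_tag → Spec_extract_single_line_span tokens keyword_tag (extract_single_line_span tokens keyword_tag)

-- ===== LEMMAS AND PROOFS =====

-- A's inner scan computes exactly B's line split, with the end index adjusted by the line length.
theorem pvScanA_eq_lineSplit : ∀ (r : List String) (e : Int),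
    pvScanA r e = (e + ((pvLineSplit r).1.length : Int), (pvLineSplit r).2) := by
  intro r
  induction r with
  | nil => intro e; simp [pvScanA, pvLineSplit]
  | cons t r ih =>
    intro e
    simp only [pvScanA, pvLineSplit]
    split
    · simp
    · rw [ih (e + 1)]
      simp only [Prod.mk.injEq, List.length_cons]
      exact ⟨by push_cast; ring, trivial⟩

theorem pvLineSplit_rest_sep : ∀ (ts : List String) (s : String) (rest : List String),
    (pvLineSplit ts).2 = s :: rest → pvIsSep s = true := by
  intro ts
  induction ts with
  | nil => intro s rest h; simp [pvLineSplit] at h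
  | cons t r ih =>
    intro s rest h
    simp only [pvLineSplit] at h
    split at h
    · next hsep =>
        have h2 : t :: r = s :: rest := h
        injection h2 with ha _
        exact ha ▸ hsep
    · exact ih s rest h

-- dropping a non-keyword, non-line-opening step: B ignores a leading token that is a separator,
-- and a leading non-separator ≠ kw only shifts the line search by one.
theorem pvGoB_sep (kw t : String) (r : List String) (i : Int) (hsep : pvIsSep t = true) :
    pvGoB kw (t :: r) i = pvGoB kw r (i + 1) := by
  rw [pvGoB]
  simp [pvLineSplit, hsep, pvFindK]

theorem pvGoB_shift (kw t : String) (r : List String) (i : Int)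
    (hsep : pvIsSep t = false) (hne : (t == kw) = false) :
    pvGoB kw (t :: r) i = pvGoB kw r (i + 1) := by
  rw [pvGoB]
  cases r with
  | nil =>
    simp [pvLineSplit, hsep, hne, pvFindK, pvGoB]
  | cons u v =>
    rw [pvGoB]
    simp only [pvLineSplit, hsep, Bool.false_eq_true, if_false]
    simp only [pvFindK, hne, Bool.false_eq_true, if_false]
    simp only [List.length_cons]
    push_cast
    have harith : ∀ (L : Int), i + (L + 1) = i + 1 + L := fun L => by ring
    simp only [harith]

theorem pvGo_eq : ∀ (n : ℕ) (kw : String) (ts : List String) (i : Int),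
    ts.length ≤ n → (pvIsSep kw = false ∨ kw ∉ ts) → pvGoA kw ts i = pvGoB kw ts i := by
  intro n
  induction n with
  | zero =>
    intro kw ts i hlen _
    have : ts = [] := List.length_eq_zero_iff.mp (Nat.le_zero.mp hlen)
    subst this
    rw [pvGoA, pvGoB]
  | succ n ih =>
    intro kw ts i hlen hk
    cases ts with
    | nil => rw [pvGoA, pvGoB]
    | cons t r =>
      by_cases hEq : (t == kw) = true
      · -- keyword hit: A scans to end of line; B's line starts with the keyword
        have hkw : pvIsSep kw = false := by
          rcases hk with h | h
          · exact h
          · exact absurd (eq_of_beq hEq ▸ List.mem_cons_self) h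
        have htsep : pvIsSep t = false := by
          have := eq_of_beq hEq; subst this; exact hkw
        rw [pvGoA, pvGoB]
        simp only [hEq, if_true]
        simp only [pvLineSplit, htsep, Bool.false_eq_true, if_false]
        simp only [pvFindK, hEq, if_true]
        rw [pvScanA_eq_lineSplit]
        simp only [List.length_cons]
        have hj : i + 1 + ((pvLineSplit r).1.length : Int)
            = i + (((pvLineSplit r).1.length : Int) + 1) := by ring
        cases hrest : (pvLineSplit r).2 with
        | nil =>
          simp only [List.tail_nil, ne_eq, not_true_eq_false]
          rw [pvGoA, pvGoB]
          push_cast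
          simp [hj]
        | cons s rest =>
          have hssep : pvIsSep s = true := pvLineSplit_rest_sep r s rest hrest
          have hsne : (s == kw) = false := by
            cases hb : (s == kw) with
            | false => rfl
            | true =>
                rw [eq_of_beq hb, hkw] at hssep
                simp at hssep
          simp only [hssep, if_true, List.tail_cons, ne_eq, reduceCtorEq,
            not_false_eq_true, if_true]
          rw [pvGoA]
          simp only [hsne, Bool.false_eq_true, if_false]
          have hr : (pvLineSplit r).2.length ≤ r.length := pvLineSplit_len_le r
          rw [hrest] at hr
          simp only [List.length_cons] at hlen hr
          have hrec : pvGoA kw rest (i + 1 + ((pvLineSplit r).1.length : Int) + 1)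
              = pvGoB kw rest (i + 1 + ((pvLineSplit r).1.length : Int) + 1) :=
            ih kw rest _ (by omega) (Or.inl hkw)
          rw [hrec]
          push_cast
          rw [hj]
          have : i + (((pvLineSplit r).1.length : Int) + 1) + 1
              = i + 1 + ((pvLineSplit r).1.length : Int) + 1 := by ring
          rw [this]
          simp
      · -- no keyword here: both sides just advance by one token
        have hEq2 : (t == kw) = false := by
          cases hb : (t == kw) with
          | false => rfl
          | true => exact absurd hb hEq
        rw [pvGoA]
        simp only [hEq2, Bool.false_eq_true, if_false]
        have hB : pvGoB kw (t :: r) i = pvGoB kw r (i + 1) := by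
          cases hs : pvIsSep t with
          | true => exact pvGoB_sep kw t r i hs
          | false => exact pvGoB_shift kw t r i hs hEq2
        rw [hB]
        have hk' : pvIsSep kw = false ∨ kw ∉ r := by
          rcases hk with h | h
          · exact Or.inl h
          · exact Or.inr (fun hm => h (List.mem_cons_of_mem t hm))
        exact ih kw r (i + 1) (by simpa using Nat.le_of_succ_le_succ hlen) hk'

-- ===== VERDICT (by name: the statement is the Claim_ definition above) =====
theorem extract_single_line_span_spec : Claim_equal_extract_single_line_span := by
  intro tokens keyword_tag _ hpre
  unfold Spec_extract_single_line_span extract_single_line_span extract_single_line_span_alt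
  exact pvGo_eq tokens.length keyword_tag tokens 0 le_rfl hpre
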